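-- pv_equiv track=rewrite | github.com/arturcnnl/PL2025 | TPC2/leitor.py | obras_por_periodo
-- ===== SOURCE A (Python) =====
-- def obras_por_periodo(dados):
--     dicionario = {}
--     for obra in dados:
--         periodo = obra['periodo']
--         nome = obra['nome']
--         if periodo not in dicionario:
--             dicionario[periodo] = []
--         dicionario[periodo].append(nome)
--
--     for periodo in dicionario:
--         dicionario[periodo].sort()
--     return dicionario
-- ===== SOURCE B (Python) =====
-- def obras_por_periodo(dados):
--     dicionario = {}
--     for obra in dados:
--         grupo = dicionario.setdefault(obra['periodo'], [])
--         nome = obra['nome']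
--         i = 0
--         while i < len(grupo) and not (nome < grupo[i]):
--             i += 1
--         grupo.insert(i, nome)
--     return dicionario
-- ===== Notes on version B (the rewrite author's own statement) =====
-- stated objective: alternative
-- what changed: B builds each group in one pass by inserting every name at its sorted position as it arrives (maintaining a sorted-list invariant), instead of A's append-everything-then-sort-each-group second pass.
import Mathlib
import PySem

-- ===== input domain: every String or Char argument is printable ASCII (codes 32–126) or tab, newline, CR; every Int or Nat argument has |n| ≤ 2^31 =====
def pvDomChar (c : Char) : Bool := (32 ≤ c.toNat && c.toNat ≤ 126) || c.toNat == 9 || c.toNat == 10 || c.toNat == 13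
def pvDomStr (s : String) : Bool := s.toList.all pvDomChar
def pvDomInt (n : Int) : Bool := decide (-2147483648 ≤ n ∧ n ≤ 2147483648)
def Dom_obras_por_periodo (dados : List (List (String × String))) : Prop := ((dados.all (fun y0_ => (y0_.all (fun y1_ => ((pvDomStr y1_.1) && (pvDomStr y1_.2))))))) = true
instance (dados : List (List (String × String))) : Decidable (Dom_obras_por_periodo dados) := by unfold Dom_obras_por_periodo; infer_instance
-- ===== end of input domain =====

-- B inserts each name at its sorted place in one pass instead of A's group-then-sort-each-group; return-value equivalence only (A returns a fresh dict, B mutates nothing of the input either).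

-- ===== PORT A =====
-- obra['periodo'] / obra['nome'] are ported in the total form getD "" ; Pre_ below restricts to
-- inputs where both keys are present, exactly the inputs where the Python returns (else KeyError).
def obras_por_periodo (dados : List (List (String × String))) : List (String × List String) :=
  let dicionario : PySem.Dict String (List String) :=
    dados.foldl (fun dicionario obra =>
      let periodo := (PySem.Dict.ofList obra).getD "periodo" ""
      let nome := (PySem.Dict.ofList obra).getD "nome" ""
      let dicionario := if dicionario.contains periodo then dicionario else dicionario.insert periodo []
      dicionario.modify periodo [] (fun v => v ++ [nome])) PySem.Dict.empty
  let dicionario :=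
    dicionario.keys.foldl (fun d periodo =>
      d.modify periodo [] (fun v => PySem.List.sorted v (fun x => x) false)) dicionario
  dicionario.items

-- ===== PORT B =====
-- transliteration of Source B's while/insert: walk past every element ≤ nome, insert there
def insertSorted (nome : String) (grupo : List String) : List String :=
  match grupo with
  | [] => [nome]
  | y :: ys => if nome < y then nome :: y :: ys else y :: insertSorted nome ys

def obras_por_periodo_alt (dados : List (List (String × String))) : List (String × List String) :=
  (dados.foldl (fun dicionario obra =>
      dicionario.modify ((PySem.Dict.ofList obra).getD "periodo" "") []
        (fun grupo => insertSorted ((PySem.Dict.ofList obra).getD "nome" "") grupo))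
    (PySem.Dict.empty : PySem.Dict String (List String))).items

-- ===== PRECONDITION & SPEC =====
-- Pre_ excludes exactly the inputs where the Python A raises KeyError: some obra lacks key 'periodo' or 'nome'.
def Pre_obras_por_periodo (dados : List (List (String × String))) : Prop :=
  ∀ o ∈ dados, ("periodo" ∈ o.map Prod.fst ∧ "nome" ∈ o.map Prod.fst)
instance (dados : List (List (String × String))) : Decidable (Pre_obras_por_periodo dados) := by unfold Pre_obras_por_periodo; infer_instance
def pvWitness_obras_por_periodo : (List (List (String × String))) :=
  [[("periodo", "xix"), ("nome", "Os Maias")], [("periodo", "xix"), ("nome", "Amor de Perdicao")]]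

def Spec_obras_por_periodo (dados : List (List (String × String))) (out : List (String × List String)) : Prop := out = obras_por_periodo_alt dados
instance (dados : List (List (String × String))) (out : List (String × List String)) : Decidable (Spec_obras_por_periodo dados out) := by unfold Spec_obras_por_periodo; infer_instance

-- ===== CLAIM (what is proved, stated in full; the proofs are below) =====
def Claim_equal_obras_por_periodo : Prop := ∀ (dados : List (List (String × String))), Dom_obras_por_periodo dados → Pre_obras_por_periodo dados → Spec_obras_por_periodo dados (obras_por_periodo dados)

-- ===== LEMMAS AND PROOFS =====

-- the value map relating B's dict to A's pre-sort dict
def pvSortVal (p : String × List String) : String × List String :=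
  (p.1, PySem.List.sorted p.2 (fun x => x) false)

lemma insertSorted_perm (x : String) (g : List String) :
    (insertSorted x g).Perm (g ++ [x]) := by
  induction g with
  | nil => simp [insertSorted]
  | cons y ys ih =>
    simp only [insertSorted]
    split
    · exact (List.perm_append_singleton x (y :: ys)).symm
    · exact ih.cons y

lemma insertSorted_pairwise (x : String) (g : List String)
    (hg : g.Pairwise (· ≤ ·)) : (insertSorted x g).Pairwise (· ≤ ·) := by
  induction g with
  | nil => simp [insertSorted]
  | cons y ys ih =>
    rcases List.pairwise_cons.mp hg with ⟨hy, hys⟩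
    simp only [insertSorted]
    split
    · rename_i hlt
      refine List.pairwise_cons.mpr ⟨?_, hg⟩
      intro a ha
      rcases List.mem_cons.mp ha with rfl | ha
      · exact le_of_lt hlt
      · exact le_trans (le_of_lt hlt) (hy a ha)
    · rename_i hnlt
      refine List.pairwise_cons.mpr ⟨?_, ih hys⟩
      intro a ha
      have := (insertSorted_perm x ys).mem_iff.mp ha
      rcases List.mem_append.mp this with ha' | ha'
      · exact hy a ha'
      · simp at ha'; subst ha'; exact le_of_not_gt hnlt

lemma insertSorted_eq_sorted_append (x : String) (v : List String) :
    insertSorted x (PySem.List.sorted v (fun y => y) false)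
      = PySem.List.sorted (v ++ [x]) (fun y => y) false := by
  have hs : PySem.List.sorted (v ++ [x]) (fun y => y) false
      = PySem.List.sorted (PySem.List.sorted v (fun y => y) false ++ [x]) (fun y => y) false := by
    exact PySem.List.sorted_eq_sorted_of_perm _ _ _ (fun a b h => h)
      (((PySem.List.sorted_perm v (fun y => y) false).append_right [x]).symm)
  rw [hs]
  exact (PySem.List.sorted_id_eq_of_perm_of_pairwise _ _
    (insertSorted_perm x _)
    (insertSorted_pairwise x _ (PySem.List.sorted_pairwise v (fun y => y)))).symm

lemma keys_insert_eq_of_contains {d : PySem.Dict String (List String)} {k : String} {v : List String}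
    (h : d.contains k = true) : (d.insert k v).keys = d.keys := by
  simp only [PySem.Dict.insert, h, if_true, PySem.Dict.keys, List.map_map]
  refine List.map_congr_left (fun p _ => ?_)
  by_cases hp : p.1 = k <;> simp [hp]

lemma insert_insert_absent {d : PySem.Dict String (List String)} {k : String} {v₀ v : List String}
    (h : d.contains k = false) : (d.insert k v₀).insert k v = d.insert k v := by
  have h' : (d.items.any fun p => p.1 == k) = false := h
  have hall : ∀ p ∈ d.items, ¬ p.1 = k := by
    intro p hp
    simpa using List.any_eq_false.mp h' p hp
  have hmap : List.map (fun p => if p.1 = k then (k, v) else p) d.items = d.items := by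
    refine (List.map_congr_left fun p hp => ?_).trans (List.map_id d.items)
    simp [hall p hp]
  simp [PySem.Dict.insert, PySem.Dict.contains, h', hmap]

lemma stepA_collapse (d : PySem.Dict String (List String)) (k : String) (f : List String → List String) :
    (if d.contains k then d else d.insert k []).modify k [] f = d.modify k [] f := by
  by_cases h : d.contains k = true
  · simp [h]
  · have h' : d.contains k = false := by simpa using h
    simp only [h', if_false, Bool.false_eq_true, PySem.Dict.modify,
      PySem.Dict.getD_insert_self, PySem.Dict.getD_of_not_contains d [] h']
    exact insert_insert_absent h'

lemma nodup_keys_insert {d : PySem.Dict String (List String)} {k : String} {v : List String}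
    (h : d.keys.Nodup) : (d.insert k v).keys.Nodup := by
  by_cases hc : d.contains k = true
  · rw [keys_insert_eq_of_contains hc]; exact h
  · have hc' : d.contains k = false := by simpa using hc
    simp only [PySem.Dict.insert, hc', if_false, Bool.false_eq_true, PySem.Dict.keys,
      List.map_append, List.map_cons, List.map_nil]
    refine List.nodup_append.mpr ⟨h, List.nodup_singleton _, ?_⟩
    intro a ha b hb
    have hb' : b = k := by simpa using hb
    subst hb'
    simp only [PySem.Dict.contains, List.any_eq_false] at hc'
    rcases List.mem_map.mp ha with ⟨p, hp, hpk⟩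
    intro hak
    subst hak
    exact (hc' p hp) (by simp [hpk])

lemma getD_map_sortVal (d : PySem.Dict String (List String)) (k : String) :
    (PySem.Dict.mk (d.items.map pvSortVal)).getD k []
      = PySem.List.sorted (d.getD k []) (fun y => y) false := by
  simp only [PySem.Dict.getD, PySem.Dict.get?, List.find?_map]
  have hcomp : ((fun p : String × List String => p.1 == k) ∘ pvSortVal)
      = (fun p : String × List String => p.1 == k) := by
    funext p; simp [pvSortVal]
  rw [hcomp]
  cases hf : List.find? (fun p : String × List String => p.1 == k) d.items with
  | none => simp; rfl
  | some p => simp [pvSortVal]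

lemma insert_map_sortVal (d : PySem.Dict String (List String)) (k : String) (w : List String) :
    ((PySem.Dict.mk (d.items.map pvSortVal)).insert k (PySem.List.sorted w (fun y => y) false)).items
      = (d.insert k w).items.map pvSortVal := by
  have hcont : (PySem.Dict.mk (d.items.map pvSortVal)).contains k = d.contains k := by
    simp only [PySem.Dict.contains, List.any_map]
    congr 1
  by_cases hc : d.contains k = true
  · simp only [PySem.Dict.insert, hcont, hc, if_true, List.map_map]
    refine List.map_congr_left fun p hp => ?_
    by_cases hpk : p.1 = k <;> simp [pvSortVal, hpk]
  · have hc' : d.contains k = false := by simpa using hc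
    simp [PySem.Dict.insert, hcont, hc', pvSortVal]

lemma fold_invariant (dados : List (List (String × String)))
    (dA dB : PySem.Dict String (List String))
    (h : dB.items = dA.items.map pvSortVal) :
    (dados.foldl (fun dicionario obra =>
        dicionario.modify ((PySem.Dict.ofList obra).getD "periodo" "") []
          (fun grupo => insertSorted ((PySem.Dict.ofList obra).getD "nome" "") grupo)) dB).items
    = (dados.foldl (fun dicionario obra =>
        let periodo := (PySem.Dict.ofList obra).getD "periodo" ""
        let nome := (PySem.Dict.ofList obra).getD "nome" ""
        let dicionario := if dicionario.contains periodo then dicionario else dicionario.insert periodo []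
        dicionario.modify periodo [] (fun v => v ++ [nome])) dA).items.map pvSortVal := by
  induction dados generalizing dA dB with
  | nil => simpa using h
  | cons o rest ih =>
    simp only [List.foldl_cons]
    apply ih
    have hdB : dB = PySem.Dict.mk (dA.items.map pvSortVal) := by
      cases dB with | mk l => exact congrArg PySem.Dict.mk h
    rw [stepA_collapse]
    simp only [PySem.Dict.modify]
    rw [hdB, getD_map_sortVal, insertSorted_eq_sorted_append]
    exact insert_map_sortVal dA _ _

lemma nodup_keys_foldA (dados : List (List (String × String)))
    (dA : PySem.Dict String (List String)) (h : dA.keys.Nodup) :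
    ((dados.foldl (fun dicionario obra =>
        let periodo := (PySem.Dict.ofList obra).getD "periodo" ""
        let nome := (PySem.Dict.ofList obra).getD "nome" ""
        let dicionario := if dicionario.contains periodo then dicionario else dicionario.insert periodo []
        dicionario.modify periodo [] (fun v => v ++ [nome])) dA)).keys.Nodup := by
  induction dados generalizing dA with
  | nil => simpa using h
  | cons o rest ih =>
    simp only [List.foldl_cons]
    apply ih
    rw [stepA_collapse]
    simp only [PySem.Dict.modify]
    exact nodup_keys_insert h

lemma sortFold (ks : List String) (d : PySem.Dict String (List String))
    (hnd : d.keys.Nodup) (hks : ∀ k ∈ ks, d.contains k = true) :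
    (ks.foldl (fun d periodo =>
        d.modify periodo [] (fun v => PySem.List.sorted v (fun x => x) false)) d).items
      = d.items.map (fun p => if p.1 ∈ ks then pvSortVal p else p) := by
  induction ks generalizing d with
  | nil => simp
  | cons k ks ih =>
    simp only [List.foldl_cons]
    have hck : d.contains k = true := hks k (by simp)
    have hstep : (d.modify k [] (fun v => PySem.List.sorted v (fun x => x) false)).items
        = d.items.map (fun p => if p.1 = k then pvSortVal p else p) := by
      simp only [PySem.Dict.modify, PySem.Dict.insert, hck, if_true]
      refine List.map_congr_left fun p hp => ?_
      by_cases hpk : p.1 = k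
      · have hmem : (k, p.2) ∈ d.items := by rw [← hpk]; exact hp
        have hv : d.getD k [] = p.2 := PySem.Dict.getD_of_mem_items d hmem hnd []
        simp [hpk, pvSortVal, hv]
      · simp [hpk]
    have hkeys : (d.modify k [] (fun v => PySem.List.sorted v (fun x => x) false)).keys = d.keys := by
      simp only [PySem.Dict.keys, hstep, List.map_map]
      refine List.map_congr_left fun p hp => ?_
      by_cases hpk : p.1 = k <;> simp [hpk, pvSortVal]
    have hcont : ∀ k', (d.modify k [] (fun v => PySem.List.sorted v (fun x => x) false)).contains k'
        = d.contains k' := by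
      intro k'
      simp only [PySem.Dict.contains, hstep, List.any_map]
      congr 1
      funext p
      by_cases hpk : p.1 = k <;> simp [hpk, pvSortVal, Function.comp]
    rw [ih _ (by rw [hkeys]; exact hnd) (fun k' hk' => by rw [hcont]; exact hks k' (by simp [hk']))]
    rw [hstep, List.map_map]
    refine List.map_congr_left fun p hp => ?_
    by_cases hpk : p.1 = k <;> by_cases hpks : p.1 ∈ ks <;>
      simp [hpk, hpks, pvSortVal, Function.comp, PySem.List.sorted_sorted]

-- ===== VERDICT (by name: the statement is the Claim_ definition above) =====
lemma contains_of_mem_keys (d : PySem.Dict String (List String)) (k : String)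
    (h : k ∈ d.keys) : d.contains k = true := by
  simp only [PySem.Dict.keys] at h
  rcases List.mem_map.mp h with ⟨p, hp, hpk⟩
  simp only [PySem.Dict.contains, List.any_eq_true]
  exact ⟨p, hp, by simp [hpk]⟩

theorem obras_por_periodo_spec : Claim_equal_obras_por_periodo := by
  intro dados _ _
  unfold Spec_obras_por_periodo obras_por_periodo obras_por_periodo_alt
  have hnd := nodup_keys_foldA dados PySem.Dict.empty (by simp [PySem.Dict.empty, PySem.Dict.keys])
  rw [sortFold _ _ hnd (fun k hk => contains_of_mem_keys _ k hk)]
  rw [fold_invariant dados PySem.Dict.empty PySem.Dict.empty (by simp [PySem.Dict.empty])]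
  refine List.map_congr_left fun p hp => ?_
  have : p.1 ∈ (dados.foldl (fun dicionario obra =>
      let periodo := (PySem.Dict.ofList obra).getD "periodo" ""
      let nome := (PySem.Dict.ofList obra).getD "nome" ""
      let dicionario := if dicionario.contains periodo then dicionario else dicionario.insert periodo []
      dicionario.modify periodo [] (fun v => v ++ [nome])) PySem.Dict.empty).keys :=
    List.mem_map.mpr ⟨p, hp, rfl⟩
  simp [this]
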